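-- pv_equiv track=rewrite | github.com/AndreBFarias/protocolo-ouroboros | src/intake/heterogeneidade.py | _ha_distintos_em_paginas_distintas
-- ===== SOURCE A (Python) =====
-- def _ha_distintos_em_paginas_distintas(ids_por_pagina: list[set[str]]) -> bool:
--     """Devolve True se >= 2 IDs distintos aparecem em conjuntos de páginas diferentes.
--
--     Mesmo bilhete em 2 páginas (caso da duplicata pg1==pg2 do pdf_notas)
--     NÃO conta -- vira 1 ID único.
--
--     IDs todos na mesma página (caso patológico onde pg1 cita um bilhete
--     e a chave NFe correspondente) também não conta -- não há divisão real
--     de documentos lógicos.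
--     """
--     todos_ids: set[str] = set()
--     for ids in ids_por_pagina:
--         todos_ids.update(ids)
--     if len(todos_ids) < 2:
--         return False
--     # Verifica se existe algum par (id_a, id_b) cujas páginas de aparição
--     # divergem -- se sim, são documentos lógicos diferentes.
--     for id_a in todos_ids:
--         paginas_a = frozenset(i for i, ids in enumerate(ids_por_pagina) if id_a in ids)
--         for id_b in todos_ids:
--             if id_a >= id_b:
--                 continue  # evita comparar consigo e duplicar pares
--             paginas_b = frozenset(i for i, ids in enumerate(ids_por_pagina) if id_b in ids)
--             if paginas_a != paginas_b:
--                 return True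
--     return False
-- ===== SOURCE B (Python) =====
-- def _ha_distintos_em_paginas_distintas(ids_por_pagina: list[set[str]]) -> bool:
--     """Build id -> set of pages it appears on in one pass, then check whether
--     at least two distinct page-signatures exist."""
--     paginas: dict[str, set[int]] = {}
--     for i, ids in enumerate(ids_por_pagina):
--         for id_ in ids:
--             paginas.setdefault(id_, set()).add(i)
--     assinaturas = {frozenset(p) for p in paginas.values()}
--     return len(assinaturas) >= 2
-- ===== Notes on version B (the rewrite author's own statement) =====
-- stated objective: alternative
-- what changed: Replaces A's all-pairs comparison of per-id page signatures (each recomputed by scanning all pages) with a single pass that groups page indices per id in a dict and checks whether at least two distinct signatures exist.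
import Mathlib
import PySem

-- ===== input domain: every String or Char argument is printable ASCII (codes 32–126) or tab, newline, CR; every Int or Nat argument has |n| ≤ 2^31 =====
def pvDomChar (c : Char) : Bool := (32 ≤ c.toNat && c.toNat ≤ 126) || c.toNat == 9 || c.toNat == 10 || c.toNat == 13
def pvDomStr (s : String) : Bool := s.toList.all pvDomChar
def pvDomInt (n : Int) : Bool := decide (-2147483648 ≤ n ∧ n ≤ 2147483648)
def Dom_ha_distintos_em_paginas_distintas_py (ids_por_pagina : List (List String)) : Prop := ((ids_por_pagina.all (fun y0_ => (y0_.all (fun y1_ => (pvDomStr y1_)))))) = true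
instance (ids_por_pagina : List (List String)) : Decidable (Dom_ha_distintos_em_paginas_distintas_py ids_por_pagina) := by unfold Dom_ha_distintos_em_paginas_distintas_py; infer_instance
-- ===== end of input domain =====

-- B replaces A's all-pairs page-signature comparison by one pass that groups pages per id
-- in a dict and counts distinct signatures (objective: alternative).

-- ===== PORT A =====
-- frozenset(i for i, ids in enumerate(l) if id in ids): the indices are produced in
-- strictly increasing order, so this list of indices represents the frozenset exactly
-- (two such lists are equal iff the frozensets are equal).
def pvPagesA (l : List (List String)) (id : String) : List Int :=
  ((PySem.List.enumerate l).filter (fun p => p.2.contains id)).map (·.1)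

def ha_distintos_em_paginas_distintas_py (ids_por_pagina : List (List String)) : Bool :=
  -- todos_ids = set(); for ids in ids_por_pagina: todos_ids.update(ids)
  let todos : PySem.Set String :=
    ids_por_pagina.foldl (fun s ids => PySem.Set.update s ids) PySem.Set.empty
  if todos.length < 2 then false
  else
    -- for id_a in todos: for id_b in todos: skip unless id_a < id_b; return True on a differing pair
    todos.any (fun id_a =>
      let paginas_a := pvPagesA ids_por_pagina id_a
      todos.any (fun id_b =>
        if id_b ≤ id_a then false
        else decide (paginas_a ≠ pvPagesA ids_por_pagina id_b)))

-- ===== PORT B =====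
-- inner body of the pass: for id_ in ids: paginas.setdefault(id_, set()).add(i)
def pvStepB (d : PySem.Dict String (List Int)) (p : Int × List String) :
    PySem.Dict String (List Int) :=
  p.2.foldl (fun d id => d.insert id (PySem.Set.add (d.getD id []) p.1)) d

def ha_distintos_em_paginas_distintas_py_alt (ids_por_pagina : List (List String)) : Bool :=
  let d : PySem.Dict String (List Int) :=
    (PySem.List.enumerate ids_por_pagina).foldl pvStepB PySem.Dict.empty
  -- each per-id page set is built in increasing page order, so its list represents the
  -- frozenset exactly; assinaturas = {frozenset(p) for p in paginas.values()}
  decide (2 ≤ (PySem.Set.ofList d.values).length)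

-- ===== PRECONDITION & SPEC =====
def Spec_ha_distintos_em_paginas_distintas_py (ids_por_pagina : List (List String)) (out : Bool) : Prop := out = ha_distintos_em_paginas_distintas_py_alt ids_por_pagina
instance (ids_por_pagina : List (List String)) (out : Bool) : Decidable (Spec_ha_distintos_em_paginas_distintas_py ids_por_pagina out) := by unfold Spec_ha_distintos_em_paginas_distintas_py; infer_instance

-- ===== CLAIM (what is proved, stated in full; the proofs are below) =====
def Claim_equal_ha_distintos_em_paginas_distintas_py : Prop := ∀ (ids_por_pagina : List (List String)), Dom_ha_distintos_em_paginas_distintas_py ids_por_pagina → Spec_ha_distintos_em_paginas_distintas_py ids_por_pagina (ha_distintos_em_paginas_distintas_py ids_por_pagina)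

-- ===== LEMMAS AND PROOFS =====

theorem pv_add_add_self {α : Type} [BEq α] [LawfulBEq α] (s : List α) (x : α) :
    PySem.Set.add (PySem.Set.add s x) x = PySem.Set.add s x := by
  simp [PySem.Set.add]; split_ifs with h1 <;> simp_all

theorem pv_add_eq_append {α : Type} [BEq α] [LawfulBEq α] (s : List α) (x : α) (h : x ∉ s) :
    PySem.Set.add s x = s ++ [x] := by
  simp [PySem.Set.add]
  intro hc
  simp_all

-- inner loop of B: one page's effect on the dict
theorem pv_stepB_get? (ids : List String) (i : Int) (d : PySem.Dict String (List Int))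
    (k : String) :
    (pvStepB d (i, ids)).get? k =
      if k ∈ ids then some (PySem.Set.add (d.getD k []) i) else d.get? k := by
  induction ids generalizing d with
  | nil => simp [pvStepB]
  | cons id rest ih =>
    show ((rest.foldl _ (d.insert id (PySem.Set.add (d.getD id []) i)))).get? k = _
    rw [show (rest.foldl (fun d id => d.insert id (PySem.Set.add (d.getD id []) i))
          (d.insert id (PySem.Set.add (d.getD id []) i)))
        = pvStepB (d.insert id (PySem.Set.add (d.getD id []) i)) (i, rest) from rfl, ih]
    by_cases hk : k ∈ rest
    · simp only [hk, if_true, List.mem_cons, or_true, if_true]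
      by_cases he : k = id
      · subst he
        rw [PySem.Dict.getD_insert_self, pv_add_add_self]
      · rw [PySem.Dict.getD_insert_of_ne]
        exact he
    · simp only [hk, if_false, List.mem_cons, or_false]
      by_cases he : k = id
      · subst he; simp [PySem.Dict.get?_insert_self]
      · simp [he, PySem.Dict.get?_insert_of_ne _ _ he]

-- invariant: every stored page index is below the next page index n
def pvBnd (d : PySem.Dict String (List Int)) (n : Int) : Prop :=
  ∀ k v, d.get? k = some v → ∀ x ∈ v, x < n

theorem pv_bnd_step (d : PySem.Dict String (List Int)) (n : Int) (page : List String)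
    (hd : pvBnd d n) : pvBnd (pvStepB d (n, page)) (n + 1) := by
  intro k v hv x hx
  rw [pv_stepB_get?] at hv
  split_ifs at hv with hk
  · cases hv
    rcases (PySem.Set.mem_add _ _ _).1 hx with h | h
    · rw [PySem.Dict.getD_eq_get?_getD] at h
      cases hw : d.get? k with
      | none => rw [hw] at h; simp at h
      | some w => rw [hw] at h; have := hd k w hw x h; omega
    · omega
  · have := hd k v hv x hx; omega

theorem pv_getD_not_mem_self (d : PySem.Dict String (List Int)) (n : Int) (k : String)
    (hd : pvBnd d n) : n ∉ d.getD k [] := by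
  rw [PySem.Dict.getD_eq_get?_getD]
  cases hw : d.get? k with
  | none => simp
  | some w => intro h; have := hd k w hw n h; omega

-- B's whole pass: the dict maps each occurring id to its (increasing) list of pages
theorem pv_loopB_get? (l : List (List String)) (n : Int) (d : PySem.Dict String (List Int))
    (hd : pvBnd d n) (k : String) :
    ((PySem.List.enumerate l n).foldl pvStepB d).get? k =
      if l.any (fun ids => ids.contains k) then
        some (d.getD k [] ++ ((PySem.List.enumerate l n).filter (fun p => p.2.contains k)).map (·.1))
      else d.get? k := by
  induction l generalizing n d with
  | nil => simp [PySem.List.enumerate_nil]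
  | cons page rest ih =>
    rw [PySem.List.enumerate_cons, List.foldl_cons,
        ih (n + 1) (pvStepB d (n, page)) (pv_bnd_step d n page hd)]
    by_cases hk : k ∈ page
    · have hc : page.contains k = true := by simpa using hk
      have hget : (pvStepB d (n, page)).get? k = some (d.getD k [] ++ [n]) := by
        rw [pv_stepB_get?, if_pos hk, pv_add_eq_append _ _ (pv_getD_not_mem_self d n k hd)]
      have hgetD : (pvStepB d (n, page)).getD k [] = d.getD k [] ++ [n] := by
        rw [PySem.Dict.getD_eq_get?_getD, hget]; rfl
      simp only [List.any_cons, hc, Bool.true_or, if_true, List.filter_cons, List.map_cons]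
      by_cases hr : rest.any (fun ids => ids.contains k)
      · rw [if_pos hr, hgetD]; simp
      · rw [if_neg hr, hget]
        have hfil : ((PySem.List.enumerate rest (n + 1)).filter (fun p => p.2.contains k)) = [] := by
          rw [List.filter_eq_nil_iff]
          intro p hp
          rcases (PySem.List.mem_enumerate_iff _ _ _).1 hp with ⟨j, hj, rfl⟩
          simp only [Bool.not_eq_true]
          rw [List.any_eq_true] at hr
          push_neg at hr
          simpa using hr _ (List.getElem_mem hj)
        rw [hfil]; simp
    · have hc : page.contains k = false := by simpa using hk
      have hget : (pvStepB d (n, page)).get? k = d.get? k := by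
        rw [pv_stepB_get?, if_neg hk]
      have hgetD : (pvStepB d (n, page)).getD k [] = d.getD k [] := by
        rw [PySem.Dict.getD_eq_get?_getD, hget, PySem.Dict.getD_eq_get?_getD]
      simp only [List.any_cons, hc, Bool.false_or, List.filter_cons, hget, hgetD]
      simp

-- B's dict keys are exactly A's todos_ids set (same first-occurrence order)
theorem pv_loopB_keys (l : List (List String)) (n : Int) (d : PySem.Dict String (List Int)) :
    ((PySem.List.enumerate l n).foldl pvStepB d).keys =
      l.foldl (fun s ids => PySem.Set.update s ids) d.keys := by
  induction l generalizing n d with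
  | nil => simp [PySem.List.enumerate_nil]
  | cons page rest ih =>
    rw [PySem.List.enumerate_cons, List.foldl_cons, List.foldl_cons, ih]
    congr 1
    exact PySem.Dict.keys_foldl_insert page _ d

theorem pv_todos_nodup (l : List (List String)) (s : List String) (hs : s.Nodup) :
    (l.foldl (fun s ids => PySem.Set.update s ids) s).Nodup := by
  induction l generalizing s with
  | nil => simpa
  | cons page rest ih => exact ih _ (PySem.Set.nodup_update _ _ hs)

theorem pv_mem_todos (l : List (List String)) (s : List String) (k : String) :
    k ∈ l.foldl (fun s ids => PySem.Set.update s ids) s ↔ k ∈ s ∨ ∃ ids ∈ l, k ∈ ids := by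
  induction l generalizing s with
  | nil => simp
  | cons page rest ih =>
    rw [List.foldl_cons, ih, PySem.Set.mem_update]
    simp; tauto

theorem pv_two_mem_length {α : Type} (m : List α) (x y : α) (hx : x ∈ m) (hy : y ∈ m)
    (hxy : x ≠ y) : 2 ≤ m.length := by
  match m with
  | [] => simp at hx
  | [a] => simp at hx hy; subst hx; subst hy; exact absurd rfl hxy
  | a :: b :: t => simp

theorem pv_ofList_two_iff {α : Type} [BEq α] [LawfulBEq α] (L : List α) :
    2 ≤ (PySem.Set.ofList L).length ↔ ∃ x ∈ L, ∃ y ∈ L, x ≠ y := by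
  constructor
  · intro h
    match hm : PySem.Set.ofList L with
    | [] => simp [hm] at h
    | [a] => simp [hm] at h
    | a :: b :: t =>
      have hnd := PySem.Set.nodup_ofList (xs := L)
      rw [hm] at hnd
      have hab : a ≠ b := by simp at hnd; tauto
      refine ⟨a, ?_, b, ?_, hab⟩
      · rw [← PySem.Set.mem_ofList (xs := L), hm]; simp
      · rw [← PySem.Set.mem_ofList (xs := L), hm]; simp
  · rintro ⟨x, hx, y, hy, hxy⟩
    exact pv_two_mem_length _ x y (by rwa [PySem.Set.mem_ofList]) (by rwa [PySem.Set.mem_ofList]) hxy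

-- ===== VERDICT (by name: the statement is the Claim_ definition above) =====
theorem ha_distintos_em_paginas_distintas_py_spec : Claim_equal_ha_distintos_em_paginas_distintas_py := by
  intro l _
  unfold Spec_ha_distintos_em_paginas_distintas_py
  unfold ha_distintos_em_paginas_distintas_py ha_distintos_em_paginas_distintas_py_alt
  set todos : List String := l.foldl (fun s ids => PySem.Set.update s ids) PySem.Set.empty with htodos
  set dfin : PySem.Dict String (List Int) :=
    (PySem.List.enumerate l).foldl pvStepB PySem.Dict.empty with hdfin
  have hbnd0 : pvBnd PySem.Dict.empty 0 := by
    intro k v hv; rw [PySem.Dict.get?_empty] at hv; cases hv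
  have hkeys : dfin.keys = todos := by
    rw [hdfin, pv_loopB_keys]
    simp only [PySem.Dict.keys_empty]
    exact htodos.symm
  have hnodup : dfin.keys.Nodup := by rw [hkeys]; exact pv_todos_nodup l [] (by simp)
  have hvals : dfin.values = todos.map (fun k => pvPagesA l k) := by
    rw [PySem.Dict.values_eq_map_keys dfin hnodup [], hkeys]
    apply List.map_congr_left
    intro k hk
    have hmem : ∃ ids ∈ l, k ∈ ids := by
      rcases (pv_mem_todos l [] k).1 (htodos ▸ hk) with h | h
      · simp at h
      · exact h
    have hany : l.any (fun ids => ids.contains k) = true := by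
      rw [List.any_eq_true]
      rcases hmem with ⟨ids, hids, hkids⟩
      exact ⟨ids, hids, by simpa using hkids⟩
    have := pv_loopB_get? l 0 PySem.Dict.empty hbnd0 k
    rw [if_pos hany] at this
    rw [PySem.Dict.getD_eq_get?_getD, hdfin, this]
    simp [pvPagesA, PySem.Dict.getD_eq_get?_getD, PySem.Dict.get?_empty]
  show (if todos.length < 2 then false
        else todos.any (fun id_a =>
          let paginas_a := pvPagesA l id_a
          todos.any (fun id_b =>
            if id_b ≤ id_a then false
            else decide (paginas_a ≠ pvPagesA l id_b))))
      = decide (2 ≤ (PySem.Set.ofList dfin.values).length)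
  rw [hvals]
  -- now both sides are Booleans over todos and pvPagesA
  rw [Bool.eq_iff_iff]
  have hBiff : (decide (2 ≤ (PySem.Set.ofList (todos.map (fun k => pvPagesA l k))).length) = true)
      ↔ ∃ a ∈ todos, ∃ b ∈ todos, pvPagesA l a ≠ pvPagesA l b := by
    rw [decide_eq_true_iff, pv_ofList_two_iff]
    constructor
    · rintro ⟨x, hx, y, hy, hxy⟩
      rcases List.mem_map.1 hx with ⟨a, ha, rfl⟩
      rcases List.mem_map.1 hy with ⟨b, hb, rfl⟩
      exact ⟨a, ha, b, hb, hxy⟩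
    · rintro ⟨a, ha, b, hb, hab⟩
      exact ⟨_, List.mem_map_of_mem ha, _, List.mem_map_of_mem hb, hab⟩
  rw [hBiff]
  by_cases hlen : todos.length < 2
  · rw [if_pos hlen]
    simp only [Bool.false_eq_true, false_iff]
    rintro ⟨a, ha, b, hb, hab⟩
    have hne : a ≠ b := fun h => hab (h ▸ rfl)
    have := pv_two_mem_length todos a b ha hb hne
    omega
  · rw [if_neg hlen]
    rw [List.any_eq_true]
    constructor
    · rintro ⟨a, ha, hinner⟩
      simp only [List.any_eq_true] at hinner
      rcases hinner with ⟨b, hb, hif⟩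
      by_cases hba : b ≤ a
      · rw [if_pos hba] at hif; cases hif
      · rw [if_neg hba, decide_eq_true_iff] at hif
        exact ⟨a, ha, b, hb, hif⟩
    · rintro ⟨a, ha, b, hb, hab⟩
      have hne : a ≠ b := fun h => hab (h ▸ rfl)
      rcases lt_or_gt_of_ne hne with hlt | hgt
      · refine ⟨a, ha, ?_⟩
        simp only [List.any_eq_true]
        exact ⟨b, hb, by rw [if_neg (not_le.2 hlt)]; simpa using hab⟩
      · refine ⟨b, hb, ?_⟩
        simp only [List.any_eq_true]
        exact ⟨a, ha, by rw [if_neg (not_le.2 hgt)]; simpa using (Ne.symm hab)⟩
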